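-- pv_equiv track=rewrite | github.com/SouravKarmakar1989/cloud-mastery-terraform-learning | apps/knowledge-pipeline/build_k8s_normalized_system.py | classify_stages
-- ===== SOURCE A (Python) =====
-- from typing import Dict, List, Set, Tuple
--
-- STAGE_RULES: Dict[str, Set[str]] = {
--     "Stage 1 - Bootcamp": {"Architecture", "Pods", "Deployments", "Services", "Configuration"},
--     "Stage 2 - Builder": {"Networking", "Storage", "Scheduling", "Configuration"},
--     "Stage 3 - Operator": {"Security-RBAC", "Observability", "Troubleshooting", "On-Prem"},
--     "Stage 4 - Specialist": {"CKA-CKAD", "Troubleshooting", "Security-RBAC", "Scheduling", "Storage"},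
--     "Stage 5 - Architect": {"Cross-Cloud", "On-Prem", "Platform Engineering", "Architecture", "Security-RBAC"},
-- }
--
-- def classify_stages(concepts: List[str]) -> List[str]:
--     stages: List[str] = []
--     cset = set(concepts)
--     for stage, stage_concepts in STAGE_RULES.items():
--         if cset.intersection(stage_concepts):
--             stages.append(stage)
--     if not stages:
--         stages.append("Stage 1 - Bootcamp")
--     return stages
-- ===== SOURCE B (Python) =====
-- from typing import Dict, List, Set
--
-- STAGE_RULES: Dict[str, Set[str]] = {
--     "Stage 1 - Bootcamp": {"Architecture", "Pods", "Deployments", "Services", "Configuration"},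
--     "Stage 2 - Builder": {"Networking", "Storage", "Scheduling", "Configuration"},
--     "Stage 3 - Operator": {"Security-RBAC", "Observability", "Troubleshooting", "On-Prem"},
--     "Stage 4 - Specialist": {"CKA-CKAD", "Troubleshooting", "Security-RBAC", "Scheduling", "Storage"},
--     "Stage 5 - Architect": {"Cross-Cloud", "On-Prem", "Platform Engineering", "Architecture", "Security-RBAC"},
-- }
--
-- # Reverse index: each concept -> the stages whose rule mentions it (built once).
-- CONCEPT_TO_STAGES: Dict[str, Set[str]] = {}
-- for _stage, _cs in STAGE_RULES.items():
--     for _c in _cs: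
--         CONCEPT_TO_STAGES.setdefault(_c, set()).add(_stage)
--
-- def classify_stages(concepts: List[str]) -> List[str]:
--     matched: Set[str] = set()
--     for c in concepts:
--         matched |= CONCEPT_TO_STAGES.get(c, set())
--     stages = [stage for stage in STAGE_RULES if stage in matched]
--     if not stages:
--         stages = ["Stage 1 - Bootcamp"]
--     return stages
-- ===== Notes on version B (the rewrite author's own statement) =====
-- stated objective: alternative
-- what changed: B replaces A's per-stage intersection of set(concepts) with each rule by a precomputed reverse index CONCEPT_TO_STAGES; one pass over the input unions the matched stage names, which are then re-emitted by filtering the stage names in rule order.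
import Mathlib
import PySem

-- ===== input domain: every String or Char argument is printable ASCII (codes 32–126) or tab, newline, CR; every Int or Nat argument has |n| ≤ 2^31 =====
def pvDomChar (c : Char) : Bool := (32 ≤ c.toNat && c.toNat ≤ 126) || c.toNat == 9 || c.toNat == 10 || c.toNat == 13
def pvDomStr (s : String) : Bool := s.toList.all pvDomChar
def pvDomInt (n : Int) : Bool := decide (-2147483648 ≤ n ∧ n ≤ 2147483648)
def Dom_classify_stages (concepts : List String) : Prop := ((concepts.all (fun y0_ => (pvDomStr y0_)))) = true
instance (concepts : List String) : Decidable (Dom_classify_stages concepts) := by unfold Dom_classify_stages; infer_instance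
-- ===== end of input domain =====

-- B replaces A's per-stage intersection test with a precomputed concept→stages reverse index,
-- unioning matched stages in one pass over the input and re-emitting them in rule order (objective: alternative).

-- ===== PORT A =====
-- STAGE_RULES in insertion order; each rule set is consumed only by membership, so a list is exact.
def stageRules : List (String × List String) := [
  ("Stage 1 - Bootcamp", ["Architecture", "Pods", "Deployments", "Services", "Configuration"]),
  ("Stage 2 - Builder", ["Networking", "Storage", "Scheduling", "Configuration"]),
  ("Stage 3 - Operator", ["Security-RBAC", "Observability", "Troubleshooting", "On-Prem"]),
  ("Stage 4 - Specialist", ["CKA-CKAD", "Troubleshooting", "Security-RBAC", "Scheduling", "Storage"]),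
  ("Stage 5 - Architect", ["Cross-Cloud", "On-Prem", "Platform Engineering", "Architecture", "Security-RBAC"])]

def classify_stages (concepts : List String) : List String :=
  let cset : PySem.Set String := PySem.Set.ofList concepts
  let stages := stageRules.foldl (fun acc sr =>
    if PySem.Set.inter cset sr.2 ≠ [] then acc ++ [sr.1] else acc) ([] : List String)
  if stages = [] then stages ++ ["Stage 1 - Bootcamp"] else stages

-- ===== PORT B =====
-- CONCEPT_TO_STAGES from Source B: each concept mapped to the stages whose rule mentions it.
def conceptToStages : PySem.Dict String (List String) := PySem.Dict.ofList [
  ("Architecture", ["Stage 1 - Bootcamp", "Stage 5 - Architect"]),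
  ("Pods", ["Stage 1 - Bootcamp"]),
  ("Deployments", ["Stage 1 - Bootcamp"]),
  ("Services", ["Stage 1 - Bootcamp"]),
  ("Configuration", ["Stage 1 - Bootcamp", "Stage 2 - Builder"]),
  ("Networking", ["Stage 2 - Builder"]),
  ("Storage", ["Stage 2 - Builder", "Stage 4 - Specialist"]),
  ("Scheduling", ["Stage 2 - Builder", "Stage 4 - Specialist"]),
  ("Security-RBAC", ["Stage 3 - Operator", "Stage 4 - Specialist", "Stage 5 - Architect"]),
  ("Observability", ["Stage 3 - Operator"]),
  ("Troubleshooting", ["Stage 3 - Operator", "Stage 4 - Specialist"]),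
  ("On-Prem", ["Stage 3 - Operator", "Stage 5 - Architect"]),
  ("CKA-CKAD", ["Stage 4 - Specialist"]),
  ("Cross-Cloud", ["Stage 5 - Architect"]),
  ("Platform Engineering", ["Stage 5 - Architect"])]

def classify_stages_alt (concepts : List String) : List String :=
  let matched : PySem.Set String := concepts.foldl
    (fun m c => PySem.Set.update m (PySem.Dict.getD conceptToStages c [])) PySem.Set.empty
  let stages := (stageRules.map Prod.fst).filter (fun s => matched.contains s)
  if stages = [] then ["Stage 1 - Bootcamp"] else stages

-- ===== PRECONDITION & SPEC =====
def Spec_classify_stages (concepts : List String) (out : List String) : Prop := out = classify_stages_alt concepts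
instance (concepts : List String) (out : List String) : Decidable (Spec_classify_stages concepts out) := by unfold Spec_classify_stages; infer_instance

-- ===== CLAIM (what is proved, stated in full; the proofs are below) =====
def Claim_equal_classify_stages : Prop := ∀ (concepts : List String), Dom_classify_stages concepts → Spec_classify_stages concepts (classify_stages concepts)

-- ===== LEMMAS AND PROOFS =====

-- The literal association list behind the reverse index (its construction by Dict.ofList evaluated).
theorem ct_eq : conceptToStages = PySem.Dict.mk [
  ("Architecture", ["Stage 1 - Bootcamp", "Stage 5 - Architect"]),
  ("Pods", ["Stage 1 - Bootcamp"]),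
  ("Deployments", ["Stage 1 - Bootcamp"]),
  ("Services", ["Stage 1 - Bootcamp"]),
  ("Configuration", ["Stage 1 - Bootcamp", "Stage 2 - Builder"]),
  ("Networking", ["Stage 2 - Builder"]),
  ("Storage", ["Stage 2 - Builder", "Stage 4 - Specialist"]),
  ("Scheduling", ["Stage 2 - Builder", "Stage 4 - Specialist"]),
  ("Security-RBAC", ["Stage 3 - Operator", "Stage 4 - Specialist", "Stage 5 - Architect"]),
  ("Observability", ["Stage 3 - Operator"]),
  ("Troubleshooting", ["Stage 3 - Operator", "Stage 4 - Specialist"]),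
  ("On-Prem", ["Stage 3 - Operator", "Stage 5 - Architect"]),
  ("CKA-CKAD", ["Stage 4 - Specialist"]),
  ("Cross-Cloud", ["Stage 5 - Architect"]),
  ("Platform Engineering", ["Stage 5 - Architect"])] := by decide

-- One lookup step of Dict.getD on a literal association list.
theorem getD_mk_cons (k : String) (v : List String) (l : List (String × List String)) (c : String) :
    PySem.Dict.getD (PySem.Dict.mk ((k, v) :: l)) c [] =
      if k = c then v else PySem.Dict.getD (PySem.Dict.mk l) c [] := by
  by_cases h : k = c
  · subst h; simp [PySem.Dict.getD, PySem.Dict.get?, List.find?_cons_of_pos]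
  · simp [PySem.Dict.getD, PySem.Dict.get?, List.find?_cons_of_neg, h]

theorem getD_mk_nil (c : String) : PySem.Dict.getD (PySem.Dict.mk ([] : List (String × List String))) c [] = [] := by
  simp [PySem.Dict.getD, PySem.Dict.get?]

-- A's per-stage test: the intersection with set(concepts) is nonempty iff some concept is in the rule.
theorem interA (concepts rule : List String) :
    (PySem.Set.inter (PySem.Set.ofList concepts) rule ≠ []) ↔ ∃ c ∈ concepts, c ∈ rule := by
  simp [PySem.Set.inter, ne_eq, List.filter_eq_nil_iff, PySem.Set.mem_ofList, PySem.Set.contains]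

-- B's matched set: membership after the fold is membership in some looked-up stage list.
theorem matchedMem (concepts : List String) (m : PySem.Set String) (s : String) :
    (s ∈ concepts.foldl (fun m c => PySem.Set.update m (PySem.Dict.getD conceptToStages c [])) m) ↔
      s ∈ m ∨ ∃ c ∈ concepts, s ∈ PySem.Dict.getD conceptToStages c [] := by
  induction concepts generalizing m with
  | nil => simp
  | cons c cs ih =>
    simp [List.foldl_cons, ih, PySem.Set.mem_update]
    tauto

-- The reverse index is exact: stage s is among stagesOf c iff c is in s's rule (one lemma per stage).
theorem table1 (c : String) : ("Stage 1 - Bootcamp" ∈ PySem.Dict.getD conceptToStages c []) ↔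
    c ∈ (["Architecture", "Pods", "Deployments", "Services", "Configuration"] : List String) := by
  rw [ct_eq]
  simp only [getD_mk_cons, getD_mk_nil]
  by_cases h0 : ("Architecture" : String) = c
  · subst h0; decide
  rw [if_neg h0]
  by_cases h1 : ("Pods" : String) = c
  · subst h1; decide
  rw [if_neg h1]
  by_cases h2 : ("Deployments" : String) = c
  · subst h2; decide
  rw [if_neg h2]
  by_cases h3 : ("Services" : String) = c
  · subst h3; decide
  rw [if_neg h3]
  by_cases h4 : ("Configuration" : String) = c
  · subst h4; decide
  rw [if_neg h4]
  by_cases h5 : ("Networking" : String) = c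
  · subst h5; decide
  rw [if_neg h5]
  by_cases h6 : ("Storage" : String) = c
  · subst h6; decide
  rw [if_neg h6]
  by_cases h7 : ("Scheduling" : String) = c
  · subst h7; decide
  rw [if_neg h7]
  by_cases h8 : ("Security-RBAC" : String) = c
  · subst h8; decide
  rw [if_neg h8]
  by_cases h9 : ("Observability" : String) = c
  · subst h9; decide
  rw [if_neg h9]
  by_cases h10 : ("Troubleshooting" : String) = c
  · subst h10; decide
  rw [if_neg h10]
  by_cases h11 : ("On-Prem" : String) = c
  · subst h11; decide
  rw [if_neg h11]
  by_cases h12 : ("CKA-CKAD" : String) = c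
  · subst h12; decide
  rw [if_neg h12]
  by_cases h13 : ("Cross-Cloud" : String) = c
  · subst h13; decide
  rw [if_neg h13]
  by_cases h14 : ("Platform Engineering" : String) = c
  · subst h14; decide
  rw [if_neg h14]
  exact iff_of_false (by simp) (by intro hc; fin_cases hc <;> simp_all)
theorem table2 (c : String) : ("Stage 2 - Builder" ∈ PySem.Dict.getD conceptToStages c []) ↔
    c ∈ (["Networking", "Storage", "Scheduling", "Configuration"] : List String) := by
  rw [ct_eq]
  simp only [getD_mk_cons, getD_mk_nil]
  by_cases h0 : ("Architecture" : String) = c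
  · subst h0; decide
  rw [if_neg h0]
  by_cases h1 : ("Pods" : String) = c
  · subst h1; decide
  rw [if_neg h1]
  by_cases h2 : ("Deployments" : String) = c
  · subst h2; decide
  rw [if_neg h2]
  by_cases h3 : ("Services" : String) = c
  · subst h3; decide
  rw [if_neg h3]
  by_cases h4 : ("Configuration" : String) = c
  · subst h4; decide
  rw [if_neg h4]
  by_cases h5 : ("Networking" : String) = c
  · subst h5; decide
  rw [if_neg h5]
  by_cases h6 : ("Storage" : String) = c
  · subst h6; decide
  rw [if_neg h6]
  by_cases h7 : ("Scheduling" : String) = c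
  · subst h7; decide
  rw [if_neg h7]
  by_cases h8 : ("Security-RBAC" : String) = c
  · subst h8; decide
  rw [if_neg h8]
  by_cases h9 : ("Observability" : String) = c
  · subst h9; decide
  rw [if_neg h9]
  by_cases h10 : ("Troubleshooting" : String) = c
  · subst h10; decide
  rw [if_neg h10]
  by_cases h11 : ("On-Prem" : String) = c
  · subst h11; decide
  rw [if_neg h11]
  by_cases h12 : ("CKA-CKAD" : String) = c
  · subst h12; decide
  rw [if_neg h12]
  by_cases h13 : ("Cross-Cloud" : String) = c
  · subst h13; decide
  rw [if_neg h13]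
  by_cases h14 : ("Platform Engineering" : String) = c
  · subst h14; decide
  rw [if_neg h14]
  exact iff_of_false (by simp) (by intro hc; fin_cases hc <;> simp_all)
theorem table3 (c : String) : ("Stage 3 - Operator" ∈ PySem.Dict.getD conceptToStages c []) ↔
    c ∈ (["Security-RBAC", "Observability", "Troubleshooting", "On-Prem"] : List String) := by
  rw [ct_eq]
  simp only [getD_mk_cons, getD_mk_nil]
  by_cases h0 : ("Architecture" : String) = c
  · subst h0; decide
  rw [if_neg h0]
  by_cases h1 : ("Pods" : String) = c
  · subst h1; decide
  rw [if_neg h1]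
  by_cases h2 : ("Deployments" : String) = c
  · subst h2; decide
  rw [if_neg h2]
  by_cases h3 : ("Services" : String) = c
  · subst h3; decide
  rw [if_neg h3]
  by_cases h4 : ("Configuration" : String) = c
  · subst h4; decide
  rw [if_neg h4]
  by_cases h5 : ("Networking" : String) = c
  · subst h5; decide
  rw [if_neg h5]
  by_cases h6 : ("Storage" : String) = c
  · subst h6; decide
  rw [if_neg h6]
  by_cases h7 : ("Scheduling" : String) = c
  · subst h7; decide
  rw [if_neg h7]
  by_cases h8 : ("Security-RBAC" : String) = c
  · subst h8; decide
  rw [if_neg h8]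
  by_cases h9 : ("Observability" : String) = c
  · subst h9; decide
  rw [if_neg h9]
  by_cases h10 : ("Troubleshooting" : String) = c
  · subst h10; decide
  rw [if_neg h10]
  by_cases h11 : ("On-Prem" : String) = c
  · subst h11; decide
  rw [if_neg h11]
  by_cases h12 : ("CKA-CKAD" : String) = c
  · subst h12; decide
  rw [if_neg h12]
  by_cases h13 : ("Cross-Cloud" : String) = c
  · subst h13; decide
  rw [if_neg h13]
  by_cases h14 : ("Platform Engineering" : String) = c
  · subst h14; decide
  rw [if_neg h14]
  exact iff_of_false (by simp) (by intro hc; fin_cases hc <;> simp_all)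
theorem table4 (c : String) : ("Stage 4 - Specialist" ∈ PySem.Dict.getD conceptToStages c []) ↔
    c ∈ (["CKA-CKAD", "Troubleshooting", "Security-RBAC", "Scheduling", "Storage"] : List String) := by
  rw [ct_eq]
  simp only [getD_mk_cons, getD_mk_nil]
  by_cases h0 : ("Architecture" : String) = c
  · subst h0; decide
  rw [if_neg h0]
  by_cases h1 : ("Pods" : String) = c
  · subst h1; decide
  rw [if_neg h1]
  by_cases h2 : ("Deployments" : String) = c
  · subst h2; decide
  rw [if_neg h2]
  by_cases h3 : ("Services" : String) = c
  · subst h3; decide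
  rw [if_neg h3]
  by_cases h4 : ("Configuration" : String) = c
  · subst h4; decide
  rw [if_neg h4]
  by_cases h5 : ("Networking" : String) = c
  · subst h5; decide
  rw [if_neg h5]
  by_cases h6 : ("Storage" : String) = c
  · subst h6; decide
  rw [if_neg h6]
  by_cases h7 : ("Scheduling" : String) = c
  · subst h7; decide
  rw [if_neg h7]
  by_cases h8 : ("Security-RBAC" : String) = c
  · subst h8; decide
  rw [if_neg h8]
  by_cases h9 : ("Observability" : String) = c
  · subst h9; decide
  rw [if_neg h9]
  by_cases h10 : ("Troubleshooting" : String) = c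
  · subst h10; decide
  rw [if_neg h10]
  by_cases h11 : ("On-Prem" : String) = c
  · subst h11; decide
  rw [if_neg h11]
  by_cases h12 : ("CKA-CKAD" : String) = c
  · subst h12; decide
  rw [if_neg h12]
  by_cases h13 : ("Cross-Cloud" : String) = c
  · subst h13; decide
  rw [if_neg h13]
  by_cases h14 : ("Platform Engineering" : String) = c
  · subst h14; decide
  rw [if_neg h14]
  exact iff_of_false (by simp) (by intro hc; fin_cases hc <;> simp_all)
theorem table5 (c : String) : ("Stage 5 - Architect" ∈ PySem.Dict.getD conceptToStages c []) ↔
    c ∈ (["Cross-Cloud", "On-Prem", "Platform Engineering", "Architecture", "Security-RBAC"] : List String) := by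
  rw [ct_eq]
  simp only [getD_mk_cons, getD_mk_nil]
  by_cases h0 : ("Architecture" : String) = c
  · subst h0; decide
  rw [if_neg h0]
  by_cases h1 : ("Pods" : String) = c
  · subst h1; decide
  rw [if_neg h1]
  by_cases h2 : ("Deployments" : String) = c
  · subst h2; decide
  rw [if_neg h2]
  by_cases h3 : ("Services" : String) = c
  · subst h3; decide
  rw [if_neg h3]
  by_cases h4 : ("Configuration" : String) = c
  · subst h4; decide
  rw [if_neg h4]
  by_cases h5 : ("Networking" : String) = c
  · subst h5; decide
  rw [if_neg h5]
  by_cases h6 : ("Storage" : String) = c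
  · subst h6; decide
  rw [if_neg h6]
  by_cases h7 : ("Scheduling" : String) = c
  · subst h7; decide
  rw [if_neg h7]
  by_cases h8 : ("Security-RBAC" : String) = c
  · subst h8; decide
  rw [if_neg h8]
  by_cases h9 : ("Observability" : String) = c
  · subst h9; decide
  rw [if_neg h9]
  by_cases h10 : ("Troubleshooting" : String) = c
  · subst h10; decide
  rw [if_neg h10]
  by_cases h11 : ("On-Prem" : String) = c
  · subst h11; decide
  rw [if_neg h11]
  by_cases h12 : ("CKA-CKAD" : String) = c
  · subst h12; decide
  rw [if_neg h12]
  by_cases h13 : ("Cross-Cloud" : String) = c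
  · subst h13; decide
  rw [if_neg h13]
  by_cases h14 : ("Platform Engineering" : String) = c
  · subst h14; decide
  rw [if_neg h14]
  exact iff_of_false (by simp) (by intro hc; fin_cases hc <;> simp_all)

-- ===== VERDICT (by name: the statement is the Claim_ definition above) =====
set_option maxHeartbeats 1000000 in
theorem classify_stages_spec : Claim_equal_classify_stages := by
  intro concepts _
  unfold Spec_classify_stages classify_stages classify_stages_alt
  simp only [stageRules, List.foldl_cons, List.foldl_nil, List.map_cons, List.map_nil,
    List.filter_cons, List.filter_nil, ne_eq, interA]
  simp only [PySem.Set.contains, List.contains_iff_mem, matchedMem, PySem.Set.empty,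
    List.mem_nil_iff, false_or, table1, table2, table3, table4, table5]
  split_ifs <;> simp_all
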